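-- pv_equiv track=rewrite | github.com/douglascook/advent_of_code | 2023/puzzles/day02/cubes.py | calculate_minimum_set_power
-- ===== SOURCE A (Python) =====
-- import collections
--
-- def calculate_minimum_set_power(game):
--     max_counts = collections.defaultdict(lambda: 0)
--     for draw in game:
--         for colour, count in draw.items():
--             if max_counts[colour] < count:
--                 max_counts[colour] = count
--     power = 1
--     for v in max_counts.values():
--         power *= v
--     return power
-- ===== SOURCE B (Python) =====
-- import collections
--
-- def calculate_minimum_set_power(game):
--     # Group: colour -> list of all its counts across draws, then multiply per-colour maxima (floored at 0).
--     counts = collections.defaultdict(list)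
--     for draw in game:
--         for colour, count in draw.items():
--             counts[colour].append(count)
--     power = 1
--     for cs in counts.values():
--         power *= max([0, *cs])
--     return power
-- ===== Notes on version B (the rewrite author's own statement) =====
-- stated objective: alternative
-- what changed: Instead of maintaining a running per-colour maximum with a conditional update inside the scan, B first groups all counts by colour into lists and then reduces each group with max([0,*cs]) in a separate pass.
import Mathlib
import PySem

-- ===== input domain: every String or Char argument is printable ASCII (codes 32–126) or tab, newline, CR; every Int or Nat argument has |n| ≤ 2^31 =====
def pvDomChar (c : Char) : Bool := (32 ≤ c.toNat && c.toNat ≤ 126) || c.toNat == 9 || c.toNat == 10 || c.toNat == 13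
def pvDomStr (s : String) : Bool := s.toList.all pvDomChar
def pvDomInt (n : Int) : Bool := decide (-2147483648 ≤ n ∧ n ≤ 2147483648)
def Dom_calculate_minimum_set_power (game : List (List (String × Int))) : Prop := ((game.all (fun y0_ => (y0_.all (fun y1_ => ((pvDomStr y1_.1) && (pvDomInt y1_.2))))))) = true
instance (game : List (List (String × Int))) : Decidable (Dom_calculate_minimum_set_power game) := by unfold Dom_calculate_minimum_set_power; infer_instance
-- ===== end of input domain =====

-- B groups the counts by colour first and reduces each group with max afterwards, instead of
-- A's conditional running-maximum update inside the scan; alternative decomposition, same cost.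

-- ===== PORT A =====
-- running max per colour; the defaultdict read max_counts[colour] materialises the key with 0
def calculate_minimum_set_power (game : List (List (String × Int))) : Int :=
  let max_counts : PySem.Dict String Int :=
    game.foldl (fun d draw =>
      draw.foldl (fun d p =>
        let cur := d.getD p.1 0
        let d := d.insert p.1 cur
        if cur < p.2 then d.insert p.1 p.2 else d) d) PySem.Dict.empty
  max_counts.values.foldl (fun power v => power * v) 1

-- ===== PORT B =====
def calculate_minimum_set_power_alt (game : List (List (String × Int))) : Int :=
  let counts : PySem.Dict String (List Int) :=
    game.foldl (fun d draw =>
      draw.foldl (fun d p => d.insert p.1 (d.getD p.1 [] ++ [p.2])) d) PySem.Dict.empty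
  counts.values.foldl (fun power cs => power * PySem.List.maxD ((0 : Int) :: cs) id 0) 1

-- ===== PRECONDITION & SPEC =====
def Spec_calculate_minimum_set_power (game : List (List (String × Int))) (out : Int) : Prop := out = calculate_minimum_set_power_alt game
instance (game : List (List (String × Int))) (out : Int) : Decidable (Spec_calculate_minimum_set_power game out) := by unfold Spec_calculate_minimum_set_power; infer_instance

-- ===== CLAIM (what is proved, stated in full; the proofs are below) =====
def Claim_equal_calculate_minimum_set_power : Prop := ∀ (game : List (List (String × Int))), Dom_calculate_minimum_set_power game → Spec_calculate_minimum_set_power game (calculate_minimum_set_power game)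

-- ===== LEMMAS AND PROOFS =====

-- value-collapsing map relating B's grouped dict to A's max dict
def pvG (p : String × List Int) : String × Int := (p.1, p.2.foldl max 0)

theorem pv_insert_insert {ν : Type} (d : PySem.Dict String ν) (k : String) (a b : ν) :
    (d.insert k a).insert k b = d.insert k b := by
  rcases d with ⟨l⟩
  simp only [PySem.Dict.insert, PySem.Dict.contains]
  by_cases h : (l.any fun p => p.1 == k) = true
  · rw [if_pos h]
    have h2 : ((l.map fun p => if (p.1 == k) = true then (k, a) else p).any fun p => p.1 == k) = true := by
      rcases List.any_eq_true.mp h with ⟨p, hp, hk⟩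
      exact List.any_eq_true.mpr ⟨(k, a), List.mem_map.mpr ⟨p, hp, by simp [hk]⟩, by simp⟩
    rw [if_pos h2, if_pos h]
    simp only [List.map_map]
    congr 1
    apply List.map_congr_left
    intro p _
    by_cases hk : (p.1 == k) = true <;> simp [Function.comp, hk]
  · rw [if_neg h]
    have h2 : ((l ++ [(k, a)]).any fun p => p.1 == k) = true :=
      List.any_eq_true.mpr ⟨(k, a), by simp, by simp⟩
    rw [if_pos h2, if_neg h, List.map_append]
    have h3 : (l.map fun p => if (p.1 == k) = true then (k, b) else p) = l := by
      refine (List.map_congr_left ?_).trans (List.map_id l)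
      intro p hp
      have hne : ¬ (p.1 == k) = true := fun hc => h (List.any_eq_true.mpr ⟨p, hp, hc⟩)
      simp [hne]
    rw [h3]
    simp

theorem pv_insert_map (d : PySem.Dict String (List Int)) (k : String) (cs : List Int) :
    ((PySem.Dict.mk (d.items.map pvG)).insert k (cs.foldl max 0)).items
      = ((d.insert k cs).items.map pvG) := by
  rcases d with ⟨l⟩
  simp only [PySem.Dict.insert, PySem.Dict.contains, List.any_map]
  have hcomp : ((fun p : String × Int => p.1 == k) ∘ pvG) = (fun p : String × List Int => p.1 == k) := by
    funext p; simp [pvG]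
  rw [hcomp]
  by_cases h : (l.any fun p => p.1 == k) = true
  · rw [if_pos h, if_pos h]
    simp only [List.map_map]
    congr 1
    funext p
    by_cases hk : (p.1 == k) = true <;> simp [Function.comp, pvG, hk]
  · rw [if_neg h, if_neg h]
    simp [pvG]

theorem pv_get?_map (d : PySem.Dict String (List Int)) (k : String) :
    (PySem.Dict.mk (d.items.map pvG)).get? k = (d.get? k).map (fun cs => cs.foldl max 0) := by
  rcases d with ⟨l⟩
  simp only [PySem.Dict.get?, List.find?_map]
  have hcomp : ((fun p : String × Int => p.1 == k) ∘ pvG) = (fun p : String × List Int => p.1 == k) := by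
    funext p; simp [pvG]
  rw [hcomp]
  cases List.find? (fun p : String × List Int => p.1 == k) l <;> simp [pvG]

-- one pair processed: A's step stays the pvG-image of B's step
theorem pv_step (dA : PySem.Dict String Int) (dB : PySem.Dict String (List Int))
    (h : dA.items = dB.items.map pvG) (p : String × Int) :
    (let cur := dA.getD p.1 0
     let d := dA.insert p.1 cur
     if cur < p.2 then d.insert p.1 p.2 else d).items
      = (dB.insert p.1 (dB.getD p.1 [] ++ [p.2])).items.map pvG := by
  have hA : dA = PySem.Dict.mk (dB.items.map pvG) := by
    rcases dA with ⟨l⟩; simpa using h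
  subst hA
  have hcur : (PySem.Dict.mk (dB.items.map pvG)).getD p.1 0 = (dB.getD p.1 []).foldl max 0 := by
    simp only [PySem.Dict.getD, pv_get?_map]
    cases dB.get? p.1 <;> simp
  have hval : (dB.getD p.1 [] ++ [p.2]).foldl max 0
      = if (dB.getD p.1 []).foldl max 0 < p.2 then p.2 else (dB.getD p.1 []).foldl max 0 := by
    rw [List.foldl_append]
    simp only [List.foldl_cons, List.foldl_nil]
    rw [max_def]
    split_ifs <;> omega
  show (if (PySem.Dict.mk (dB.items.map pvG)).getD p.1 0 < p.2 then
          ((PySem.Dict.mk (dB.items.map pvG)).insert p.1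
            ((PySem.Dict.mk (dB.items.map pvG)).getD p.1 0)).insert p.1 p.2
        else (PySem.Dict.mk (dB.items.map pvG)).insert p.1
            ((PySem.Dict.mk (dB.items.map pvG)).getD p.1 0)).items
      = (dB.insert p.1 (dB.getD p.1 [] ++ [p.2])).items.map pvG
  rw [pv_insert_insert, hcur, ← pv_insert_map dB p.1 (dB.getD p.1 [] ++ [p.2]), hval]
  split_ifs <;> rfl

-- the inner (per-draw) loop preserves the relation
theorem pv_draw (draw : List (String × Int)) (dA : PySem.Dict String Int)
    (dB : PySem.Dict String (List Int)) (h : dA.items = dB.items.map pvG) :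
    (draw.foldl (fun d p =>
        let cur := d.getD p.1 0
        let d := d.insert p.1 cur
        if cur < p.2 then d.insert p.1 p.2 else d) dA).items
      = (draw.foldl (fun d p => d.insert p.1 (d.getD p.1 [] ++ [p.2])) dB).items.map pvG := by
  induction draw generalizing dA dB with
  | nil => simpa using h
  | cons p rest ih =>
      simp only [List.foldl_cons]
      exact ih _ _ (pv_step dA dB h p)

-- the outer (per-game) loop preserves the relation
theorem pv_game (game : List (List (String × Int))) (dA : PySem.Dict String Int)
    (dB : PySem.Dict String (List Int)) (h : dA.items = dB.items.map pvG) :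
    (game.foldl (fun d draw => draw.foldl (fun d p =>
        let cur := d.getD p.1 0
        let d := d.insert p.1 cur
        if cur < p.2 then d.insert p.1 p.2 else d) d) dA).items
      = (game.foldl (fun d draw =>
          draw.foldl (fun d p => d.insert p.1 (d.getD p.1 [] ++ [p.2])) d) dB).items.map pvG := by
  induction game generalizing dA dB with
  | nil => simpa using h
  | cons draw rest ih =>
      simp only [List.foldl_cons]
      exact ih _ _ (pv_draw draw dA dB h)

-- B's max([0, *cs]) is the left fold of max over cs starting from 0
theorem pv_max?_cons (cs : List Int) : ∀ (a : Int), PySem.List.max? (a :: cs) id = some (cs.foldl max a) := by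
  induction cs with
  | nil => intro a; rfl
  | cons x rest ih =>
      intro a
      have h1 : PySem.List.max? (a :: x :: rest) id = PySem.List.max? (max a x :: rest) id := by
        simp only [PySem.List.max?, List.foldl_cons, id_eq]
        congr 1
        rw [max_def]
        split_ifs <;> first | rfl | (exfalso; omega) | (congr 1; omega)
      rw [h1, ih (max a x), List.foldl_cons]

-- B's max([0, *cs]) is the left fold of max over cs starting from 0
theorem pv_maxD (cs : List Int) : PySem.List.maxD ((0 : Int) :: cs) id 0 = cs.foldl max 0 := by
  simp [PySem.List.maxD, pv_max?_cons]

-- ===== VERDICT (by name: the statement is the Claim_ definition above) =====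
theorem calculate_minimum_set_power_spec : Claim_equal_calculate_minimum_set_power := by
  intro game _
  unfold Spec_calculate_minimum_set_power
  unfold calculate_minimum_set_power calculate_minimum_set_power_alt
  have h := pv_game game PySem.Dict.empty PySem.Dict.empty (by rfl)
  simp only [PySem.Dict.values, h, List.map_map, List.foldl_map]
  congr 1
  funext power p
  simp [Function.comp, pvG, pv_maxD]
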